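-- pv_equiv track=rewrite | github.com/christianebacani/Roadmap | Coding Challenges using Python and SQL/Code Wars Python Solved Problems/Beta/validate_the_euro_bill.py | validate_euro
-- ===== SOURCE A (Python) =====
-- def validate_euro(serial_number: str) -> bool:
--     alphabets = [
--         'A', 'B', 'C', 'D',
--         'E', 'F', 'G', 'H',
--         'I', 'J', 'K', 'L',
--         'M', 'N', 'O', 'P',
--         'Q', 'R', 'S', 'T',
--         'U', 'V', 'W', 'X',
--         'Y', 'Z'
--     ]
--     first_letter_digits = alphabets.index(serial_number[0]) + 1
--     second_letter_digits = alphabets.index(serial_number[1]) + 1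
--
--     sum_of_digits = 0
--
--     for i in range(len(serial_number)):
--         if serial_number[i].isalpha():
--             continue
--
--         sum_of_digits += int(serial_number[i])
--
--     total = first_letter_digits + second_letter_digits + sum_of_digits
--
--     while len(str(total)) != 1:
--         result = 0
--
--         for i in range(len(str(total))):
--             result += int(str(total)[i])
--
--         total = result
--
--     if total == 7:
--         return True
--
--     return False
-- ===== SOURCE B (Python) =====
-- def validate_euro(serial_number: str) -> bool:
--     total = ord(serial_number[0]) - 64 + ord(serial_number[1]) - 64
--     total += sum(int(c) for c in serial_number if not c.isalpha())
--     return (total - 1) % 9 + 1 == 7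
-- ===== Notes on version B (the rewrite author's own statement) =====
-- stated objective: simpler
-- what changed: B replaces A's repeated stringify-and-sum-digits while loop with the closed-form digital root (total-1)%9+1 and the two 26-element alphabet list scans with ord() arithmetic, summing digits in one comprehension.
import Mathlib
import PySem

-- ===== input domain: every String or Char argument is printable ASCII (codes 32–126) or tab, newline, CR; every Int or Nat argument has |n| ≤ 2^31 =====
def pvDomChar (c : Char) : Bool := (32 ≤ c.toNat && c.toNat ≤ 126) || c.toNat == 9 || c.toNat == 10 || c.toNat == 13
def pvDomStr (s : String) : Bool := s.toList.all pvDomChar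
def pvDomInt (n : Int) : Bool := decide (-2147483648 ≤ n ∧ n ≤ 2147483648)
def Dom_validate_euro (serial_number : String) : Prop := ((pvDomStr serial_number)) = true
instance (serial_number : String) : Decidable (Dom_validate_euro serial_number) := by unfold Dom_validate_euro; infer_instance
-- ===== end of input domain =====

-- B replaces A's repeated string-digit-sum while loop by the closed-form digital root (total-1)%9+1
-- and the alphabet list scans by ord() arithmetic: simpler, no loop over str(total).

-- ===== PORT A =====
-- int(str-of-one-char): exact wherever Python's int() succeeds; under Pre_ every char it is
-- applied to is a decimal digit, so the `.getD 0` default is never used.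
def pvCharInt (c : Char) : Int := (PySem.Int.ofChars? [c]).getD 0

def pvAlphabets : List Char :=
  ['A', 'B', 'C', 'D', 'E', 'F', 'G', 'H', 'I', 'J', 'K', 'L', 'M',
   'N', 'O', 'P', 'Q', 'R', 'S', 'T', 'U', 'V', 'W', 'X', 'Y', 'Z']

-- one pass of A's inner 'for i in range(len(str(total))): result += int(str(total)[i])'
def pvEuroDigitSumOnce (t : Nat) : Int :=
  (PySem.List.pyRange 0 (PySem.Int.toChars (t : Int)).length 1).foldl
    (fun r i => r + pvCharInt (PySem.List.pyGetD (PySem.Int.toChars (t : Int)) i ' ')) 0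

-- The next four lemmas are cited by pvEuroWhile's decreasing_by (termination of A's while loop).
theorem pvToDigitsCore_eq : ∀ (f n : Nat) (l : List Char), 0 < n → n < 10 ^ f →
    Nat.toDigitsCore 10 f n l = ((Nat.digits 10 n).reverse.map Nat.digitChar) ++ l := by
  intro f
  induction f with
  | zero => intro n l h1 h2; simp at h2; omega
  | succ f ih =>
    intro n l h1 h2
    rw [Nat.toDigitsCore]
    by_cases h : n / 10 = 0
    · have hn : n < 10 := by omega
      simp only [h, if_pos]
      rw [Nat.digits_def' (by norm_num : (1:Nat) < 10) h1, h]
      simp [Nat.mod_eq_of_lt hn]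
    · simp only [h]
      rw [ih (n / 10) _ (by omega) (by
        have := Nat.pow_succ 10 f
        omega)]
      rw [Nat.digits_def' (by norm_num : (1:Nat) < 10) h1]
      simp

theorem pvToChars_nat (n : Nat) : PySem.Int.toChars (n : Int) =
    if n = 0 then ['0'] else (Nat.digits 10 n).reverse.map Nat.digitChar := by
  by_cases h : n = 0
  · subst h; decide
  · rw [if_neg h]
    show Nat.toDigits 10 ((n : Int)).toNat = _
    · have : ((n : Int)).toNat = n := by omega
      rw [this, Nat.toDigits, pvToDigitsCore_eq (n + 1) n [] (by omega)
        (lt_of_lt_of_le (Nat.lt_pow_self (by norm_num))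
          (Nat.pow_le_pow_right (by norm_num) (by omega)))]
      simp

theorem pvCharInt_digitChar (d : Nat) (h : d < 10) : pvCharInt (Nat.digitChar d) = (d : Int) := by
  interval_cases d <;> decide

theorem pvFoldl_charInt (l : List Nat) (h : ∀ d ∈ l, d < 10) (a : Int) :
    (l.map Nat.digitChar).foldl (fun r c => r + pvCharInt c) a = a + (l.sum : Int) := by
  induction l generalizing a with
  | nil => simp
  | cons d t ih =>
    simp only [List.map_cons, List.foldl_cons, List.sum_cons]
    rw [ih (fun x hx => h x (List.mem_cons_of_mem _ hx)),
      pvCharInt_digitChar d (h d (List.mem_cons_self ..))]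
    push_cast; ring

theorem pvDigitsSum_le (n : Nat) : (Nat.digits 10 n).sum ≤ n := by
  induction n using Nat.strong_induction_on with
  | _ n ih =>
    by_cases h : n = 0
    · subst h; simp
    · rw [Nat.digits_def' (by norm_num : (1:Nat) < 10) (by omega)]
      have h1 : (Nat.digits 10 (n / 10)).sum ≤ n / 10 := ih (n / 10) (by omega)
      have h2 := Nat.div_add_mod n 10
      simp only [List.sum_cons]
      omega

theorem pvEuroDigitSumOnce_eq (n : Nat) (h : 0 < n) :
    pvEuroDigitSumOnce n = ((Nat.digits 10 n).sum : Int) := by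
  unfold pvEuroDigitSumOnce
  rw [PySem.List.foldl_pyRange_zero_pyGetD' (PySem.Int.toChars (n : Int)) ' '
    (fun r c => r + pvCharInt c) 0]
  rw [pvToChars_nat, if_neg (by omega)]
  rw [pvFoldl_charInt _ (fun d hd => Nat.digits_lt_base (by norm_num) (List.mem_reverse.mp hd)) 0]
  simp

theorem pvToCharsLen_eq_one_iff (n : Nat) : (PySem.Int.toChars (n : Int)).length = 1 ↔ n < 10 := by
  rw [pvToChars_nat]
  by_cases h : n = 0
  · simp [h]
  · rw [if_neg h]
    simp only [List.length_map, List.length_reverse]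
    constructor
    · intro h1
      by_contra h10
      rw [Nat.digits_def' (by norm_num : (1:Nat) < 10) (by omega)] at h1
      have : Nat.digits 10 (n / 10) = [] := by
        cases hl : Nat.digits 10 (n / 10) <;> simp [hl] at h1 ⊢
      rw [Nat.digits_eq_nil_iff_eq_zero] at this
      omega
    · intro h10
      rw [Nat.digits_def' (by norm_num : (1:Nat) < 10) (by omega)]
      have : n / 10 = 0 := by omega
      simp [this]

theorem pvDigitsSum_lt (n : Nat) (h : 10 ≤ n) : (Nat.digits 10 n).sum < n := by
  rw [Nat.digits_def' (by norm_num : (1:Nat) < 10) (by omega)]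
  have h1 := pvDigitsSum_le (n / 10)
  have h2 := Nat.div_add_mod n 10
  simp only [List.sum_cons]
  omega

-- A's 'while len(str(total)) != 1: total = <digit sum of str(total)>' loop, on total.toNat
-- (exact: Pre_ guarantees 2 ≤ total whenever the loop is reached).
def pvEuroWhile (t : Nat) : Nat :=
  if (PySem.Int.toChars (t : Int)).length ≠ 1 then
    pvEuroWhile (pvEuroDigitSumOnce t).toNat
  else t
termination_by t
decreasing_by
  have h10 : 10 ≤ t := by
    by_contra hlt
    exact ‹(PySem.Int.toChars (t : Int)).length ≠ 1› ((pvToCharsLen_eq_one_iff t).mpr (by omega))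
  rw [pvEuroDigitSumOnce_eq t (by omega)]
  have := pvDigitsSum_lt t h10
  omega

def validate_euro (serial_number : String) : Bool :=
  let cs := serial_number.toList
  -- alphabets.index(serial_number[0]) + 1: the IndexError (len < 2) and ValueError
  -- (first two chars not uppercase letters) cases are excluded by Pre_, so the defaults are never used
  let first_letter_digits : Int := ((PySem.List.index? pvAlphabets (PySem.List.pyGetD cs 0 ' ')).getD 0 : Nat) + 1
  let second_letter_digits : Int := ((PySem.List.index? pvAlphabets (PySem.List.pyGetD cs 1 ' ')).getD 0 : Nat) + 1
  -- for i in range(len(serial_number)): skip alphabetic chars, add int(serial_number[i])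
  let sum_of_digits : Int := (PySem.List.pyRange 0 cs.length 1).foldl
    (fun acc i =>
      if PySem.Chars.isalpha (PySem.List.pyGetD cs i ' ') then acc
      else acc + pvCharInt (PySem.List.pyGetD cs i ' ')) 0
  let total := first_letter_digits + second_letter_digits + sum_of_digits
  let total := pvEuroWhile total.toNat
  if total = 7 then true else false

-- ===== PORT B =====
def validate_euro_alt (serial_number : String) : Bool :=
  let cs := serial_number.toList
  -- ord(serial_number[0]) - 64 + ord(serial_number[1]) - 64 (IndexError for len < 2 excluded by Pre_)
  let total : Int := ((PySem.List.pyGetD cs 0 ' ').toNat : Int) - 64 + (((PySem.List.pyGetD cs 1 ' ').toNat : Int) - 64)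
  -- total += sum(int(c) for c in serial_number if not c.isalpha())
  let total := total + ((cs.filter (fun c => !PySem.Chars.isalpha c)).map (fun c => pvCharInt c)).sum
  -- (total - 1) % 9 + 1 == 7
  PySem.Int.mod (total - 1) 9 + 1 == 7

-- ===== PRECONDITION & SPEC =====
-- Pre_: exactly the inputs where A returns — at least two chars, the first two uppercase
-- ASCII letters (else alphabets.index raises ValueError / indexing raises IndexError), and
-- every char a letter or a decimal digit (else int(c) raises ValueError).
def Pre_validate_euro (serial_number : String) : Prop :=
  2 ≤ serial_number.toList.length ∧
  ((serial_number.toList.take 2).all (fun c => 65 ≤ c.toNat && c.toNat ≤ 90)) = true ∧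
  (serial_number.toList.all (fun c => PySem.Chars.isalpha c || PySem.Chars.isdigit c)) = true
instance (serial_number : String) : Decidable (Pre_validate_euro serial_number) := by
  unfold Pre_validate_euro; infer_instance

def pvWitness_validate_euro : String := "XD1234"

def Spec_validate_euro (serial_number : String) (out : Bool) : Prop := out = validate_euro_alt serial_number
instance (serial_number : String) (out : Bool) : Decidable (Spec_validate_euro serial_number out) := by unfold Spec_validate_euro; infer_instance

-- ===== CLAIM (what is proved, stated in full; the proofs are below) =====
def Claim_equal_validate_euro : Prop := ∀ (serial_number : String), Dom_validate_euro serial_number → Pre_validate_euro serial_number → Spec_validate_euro serial_number (validate_euro serial_number)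

-- ===== LEMMAS AND PROOFS =====
theorem pvDigitsSum_pos (n : Nat) (h : 0 < n) : 0 < (Nat.digits 10 n).sum := by
  induction n using Nat.strong_induction_on with
  | _ n ih =>
    rw [Nat.digits_def' (by norm_num : (1:Nat) < 10) h]
    simp only [List.sum_cons]
    by_cases hm : n % 10 = 0
    · have hd : 0 < n / 10 := by omega
      have := ih (n / 10) (by omega) hd
      omega
    · omega

-- A's while loop computes the digital root (n-1) % 9 + 1 of any positive n.
theorem pvEuroWhile_eq (n : Nat) (h1 : 1 ≤ n) : pvEuroWhile n = (n - 1) % 9 + 1 := by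
  induction n using Nat.strong_induction_on with
  | _ n ih =>
    rw [pvEuroWhile]
    by_cases h : (PySem.Int.toChars (n : Int)).length ≠ 1
    · rw [if_pos h]
      have h10 : 10 ≤ n := by
        by_contra hlt
        exact h ((pvToCharsLen_eq_one_iff n).mpr (by omega))
      rw [pvEuroDigitSumOnce_eq n (by omega)]
      have hlt := pvDigitsSum_lt n h10
      have hpos := pvDigitsSum_pos n (by omega)
      have hmod : n % 9 = (Nat.digits 10 n).sum % 9 := Nat.modEq_digits_sum 9 10 (by norm_num) n
      have htn : ((((Nat.digits 10 n).sum : Nat) : Int)).toNat = (Nat.digits 10 n).sum := by omega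
      rw [htn, ih _ hlt (by omega)]
      omega
    · rw [if_neg h]
      simp only [ne_eq, not_not] at h
      have h10 : n < 10 := (pvToCharsLen_eq_one_iff n).mp h
      omega

-- alphabets.index of an uppercase letter is its alphabet position.
theorem pvIndex26 : ∀ k : Nat, k < 26 →
    (PySem.List.index? pvAlphabets (Char.ofNat (65 + k))).getD 0 = k := by decide

theorem pvIndex_upper (c : Char) (h1 : 65 ≤ c.toNat) (h2 : c.toNat ≤ 90) :
    ((PySem.List.index? pvAlphabets c).getD 0 : Nat) = c.toNat - 65 := by
  have hk : c.toNat - 65 < 26 := by omega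
  have hc : c = Char.ofNat (65 + (c.toNat - 65)) := by
    have : 65 + (c.toNat - 65) = c.toNat := by omega
    rw [this, Char.ofNat_toNat]
  have h := pvIndex26 (c.toNat - 65) hk
  rw [← hc] at h
  exact h

-- A's skip-alphabetic accumulation loop equals B's filter-map-sum.
theorem pvFoldl_skip_eq_filter_sum (l : List Char) (a : Int) :
    l.foldl (fun acc c => if PySem.Chars.isalpha c then acc else acc + pvCharInt c) a
      = a + ((l.filter (fun c => !PySem.Chars.isalpha c)).map (fun c => pvCharInt c)).sum := by
  induction l generalizing a with
  | nil => simp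
  | cons c t ih =>
    simp only [List.foldl_cons, List.filter_cons]
    by_cases hc : PySem.Chars.isalpha c = true
    · rw [if_pos hc, ih]; simp [hc]
    · rw [if_neg hc, ih]
      simp only [Bool.not_eq_true] at hc
      simp [hc]; ring

theorem pvCharInt_digit_nonneg (c : Char) (h : PySem.Chars.isdigit c = true) : 0 ≤ pvCharInt c := by
  have hb : 48 ≤ c.toNat ∧ c.toNat ≤ 57 := by
    simp only [PySem.Chars.isdigit, Bool.and_eq_true, decide_eq_true_eq] at h
    obtain ⟨ha, hb'⟩ := h
    rw [Char.le_def, UInt32.le_iff_toNat_le] at ha hb'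
    have e0 : ('0' : Char).val.toNat = 48 := by decide
    have e9 : ('9' : Char).val.toNat = 57 := by decide
    rw [e0] at ha; rw [e9] at hb'
    exact ⟨ha, hb'⟩
  have haux : ∀ k : Nat, k < 10 → 0 ≤ pvCharInt (Char.ofNat (48 + k)) := by decide
  have hc : c = Char.ofNat (48 + (c.toNat - 48)) := by
    have : 48 + (c.toNat - 48) = c.toNat := by omega
    rw [this, Char.ofNat_toNat]
  rw [hc]
  exact haux _ (by omega)

-- ===== VERDICT (by name: the statement is the Claim_ definition above) =====
theorem validate_euro_spec : Claim_equal_validate_euro := by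
  intro s _ hpre
  unfold Pre_validate_euro at hpre
  unfold Spec_validate_euro validate_euro validate_euro_alt
  set cs := s.toList with hcs
  obtain ⟨hlen, hupb, hdigb⟩ := hpre
  have hup : ∀ c ∈ cs.take 2, 65 ≤ c.toNat ∧ c.toNat ≤ 90 := by
    intro c hc
    have h := List.all_eq_true.mp hupb c hc
    simpa using h
  have hdig : ∀ c ∈ cs, PySem.Chars.isalpha c = true ∨ PySem.Chars.isdigit c = true := by
    intro c hc
    have h := List.all_eq_true.mp hdigb c hc
    simpa using h
  simp only []
  -- first two chars
  have h0m : PySem.List.pyGetD cs 0 ' ' = cs[0]'(by omega) := by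
    rw [show ((0 : Int) = ((0 : Nat) : Int)) from rfl, PySem.List.pyGetD_natCast]
    exact List.getD_eq_getElem cs ' ' (by omega)
  have h1m : PySem.List.pyGetD cs 1 ' ' = cs[1]'(by omega) := by
    rw [show ((1 : Int) = ((1 : Nat) : Int)) from rfl, PySem.List.pyGetD_natCast]
    exact List.getD_eq_getElem cs ' ' (by omega)
  have hm0 : cs[0]'(by omega) ∈ cs.take 2 := by
    rw [List.mem_take_iff_getElem]
    exact ⟨0, by omega, rfl⟩
  have hm1 : cs[1]'(by omega) ∈ cs.take 2 := by
    rw [List.mem_take_iff_getElem]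
    exact ⟨1, by omega, rfl⟩
  obtain ⟨hu0a, hu0b⟩ := hup _ hm0
  obtain ⟨hu1a, hu1b⟩ := hup _ hm1
  -- the two letter values agree
  have hL0 : ((PySem.List.index? pvAlphabets (PySem.List.pyGetD cs 0 ' ')).getD 0 : Int) + 1
      = ((PySem.List.pyGetD cs 0 ' ').toNat : Int) - 64 := by
    rw [h0m]
    have := pvIndex_upper _ hu0a hu0b
    omega
  have hL1 : ((PySem.List.index? pvAlphabets (PySem.List.pyGetD cs 1 ' ')).getD 0 : Int) + 1
      = ((PySem.List.pyGetD cs 1 ' ').toNat : Int) - 64 := by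
    rw [h1m]
    have := pvIndex_upper _ hu1a hu1b
    omega
  -- the digit sums agree
  have hS : (PySem.List.pyRange 0 cs.length 1).foldl
      (fun acc i =>
        if PySem.Chars.isalpha (PySem.List.pyGetD cs i ' ') then acc
        else acc + pvCharInt (PySem.List.pyGetD cs i ' ')) 0
      = ((cs.filter (fun c => !PySem.Chars.isalpha c)).map (fun c => pvCharInt c)).sum := by
    rw [PySem.List.foldl_pyRange_zero_pyGetD' cs ' '
      (fun acc c => if PySem.Chars.isalpha c then acc else acc + pvCharInt c) 0]
    rw [pvFoldl_skip_eq_filter_sum]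
    ring
  set S : Int := ((cs.filter (fun c => !PySem.Chars.isalpha c)).map (fun c => pvCharInt c)).sum with hSdef
  have hSnn : 0 ≤ S := by
    apply List.sum_nonneg
    intro x hx
    simp only [List.mem_map, List.mem_filter] at hx
    obtain ⟨c, ⟨hcm, hcna⟩, rfl⟩ := hx
    rcases hdig c hcm with hca | hcd
    · simp [hca] at hcna
    · exact pvCharInt_digit_nonneg c hcd
  rw [hS, hL0, hL1]
  set T : Int := ((PySem.List.pyGetD cs 0 ' ').toNat : Int) - 64 + (((PySem.List.pyGetD cs 1 ' ').toNat : Int) - 64) + S with hT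
  have hT2 : 2 ≤ T := by rw [hT]; omega
  -- reduce A's while loop to the closed form
  have hW := pvEuroWhile_eq T.toNat (by omega)
  rw [hW]
  have hmod : PySem.Int.mod (T - 1) 9 = (T - 1) % 9 := PySem.Int.mod_eq_emod_of_pos (by norm_num)
  by_cases h7 : (T.toNat - 1) % 9 + 1 = 7
  · rw [if_pos h7]
    exact ((beq_iff_eq).mpr (by rw [hmod]; omega)).symm
  · rw [if_neg h7]
    exact (beq_eq_false_iff_ne.mpr (by rw [hmod]; omega)).symm
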